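-- pv_equiv track=rewrite | github.com/noanutke/fMRI_E_Project | BarFeedback/runNbackTask.py | check_if_trials_order_ok
-- ===== SOURCE A (Python) =====
-- def check_if_trials_order_ok(trials):
--     same_in_row = 1
--     i = 0
--     for trial in trials:
--         if i == 0:
--             i+=1;
--             continue
--         if trial == trials[i-1]:
--             same_in_row += 1
--             if same_in_row >= 4:
--                 return False
--         else:
--             same_in_row = 1
--         i+=1
--     return True
-- ===== SOURCE B (Python) =====
-- def check_if_trials_order_ok(trials):
--     # Run-based scan: jump over each maximal block of consecutive equal elements.
--     n = len(trials)
--     i = 0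
--     while i < n:
--         j = i
--         while j < n and trials[j] == trials[i]:
--             j += 1
--         if j - i >= 4:
--             return False
--         i = j
--     return True
-- ===== Notes on version B (the rewrite author's own statement) =====
-- stated objective: alternative
-- what changed: B scans the list run by run (finding each maximal block of consecutive equal elements and checking its length) instead of A's per-element pass maintaining a running same_in_row counter and indexing trials[i-1].
import Mathlib
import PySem

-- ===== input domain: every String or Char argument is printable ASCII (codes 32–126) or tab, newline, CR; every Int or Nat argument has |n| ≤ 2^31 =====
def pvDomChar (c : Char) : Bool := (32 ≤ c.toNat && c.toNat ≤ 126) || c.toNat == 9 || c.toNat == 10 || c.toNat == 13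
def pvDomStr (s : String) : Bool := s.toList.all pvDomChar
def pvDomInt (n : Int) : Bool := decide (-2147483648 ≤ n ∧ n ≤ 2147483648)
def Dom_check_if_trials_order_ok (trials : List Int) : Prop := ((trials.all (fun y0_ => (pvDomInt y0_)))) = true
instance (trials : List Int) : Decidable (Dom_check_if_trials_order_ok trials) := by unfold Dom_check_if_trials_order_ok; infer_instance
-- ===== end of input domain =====

-- B replaces A's per-element counter loop with a run-by-run scan; alternative decomposition, same O(n) cost.


-- ===== PORT A =====
-- loop body of A: iterate over the remaining trials, carrying same_in_row and i,
-- comparing each trial against trials[i-1] exactly as the Python does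
def goA (trials : List Int) : List Int → Int → Int → Bool
  | [], _, _ => true
  | trial :: rest, same_in_row, i =>
    if i = 0 then goA trials rest same_in_row (i + 1)
    else if PySem.List.pyGet? trials (i - 1) = some trial then
      if same_in_row + 1 ≥ 4 then false
      else goA trials rest (same_in_row + 1) (i + 1)
    else goA trials rest 1 (i + 1)

def check_if_trials_order_ok (trials : List Int) : Bool :=
  goA trials trials 1 0

-- ===== PORT B =====
-- inner while loop of B: advance j while j < n and trials[j] == trials[i]
def innerB (trials : List Int) (i : Nat) (j : Nat) : Nat :=
  if j < trials.length ∧ trials[j]? = trials[i]? then innerB trials i (j + 1) else j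
  termination_by trials.length - j
  decreasing_by omega

-- needed by outerB's termination: the inner loop never moves j backwards
theorem innerB_ge (trials : List Int) (i : Nat) : ∀ (d j : Nat),
    trials.length - j ≤ d → j ≤ innerB trials i j := by
  intro d
  induction d with
  | zero =>
    intro j hd
    rw [innerB]
    split
    · omega
    · omega
  | succ d ih =>
    intro j hd
    rw [innerB]
    split
    · rename_i hcond
      have := ih (j + 1) (by omega)
      omega
    · omega

-- needed by outerB's termination: from a valid start the inner loop moves strictly forward
theorem innerB_gt (trials : List Int) (i : Nat) (hlt : i < trials.length) :
    i < innerB trials i i := by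
  rw [innerB]
  have hcond : i < trials.length ∧ trials[i]? = trials[i]? := ⟨hlt, rfl⟩
  rw [if_pos hcond]
  have := innerB_ge trials i trials.length (i + 1) (by omega)
  omega

-- outer while loop of B
def outerB (trials : List Int) (i : Nat) : Bool :=
  if h : i < trials.length then
    let j := innerB trials i i
    if j - i ≥ 4 then false else outerB trials j
  else true
  termination_by trials.length - i
  decreasing_by
    have := innerB_gt trials i h
    omega

def check_if_trials_order_ok_alt (trials : List Int) : Bool :=
  outerB trials 0

-- ===== PRECONDITION & SPEC =====
def Spec_check_if_trials_order_ok (trials : List Int) (out : Bool) : Prop := out = check_if_trials_order_ok_alt trials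
instance (trials : List Int) (out : Bool) : Decidable (Spec_check_if_trials_order_ok trials out) := by unfold Spec_check_if_trials_order_ok; infer_instance

-- ===== CLAIM (what is proved, stated in full; the proofs are below) =====
def Claim_equal_check_if_trials_order_ok : Prop := ∀ (trials : List Int), Dom_check_if_trials_order_ok trials → Spec_check_if_trials_order_ok trials (check_if_trials_order_ok trials)

-- ===== LEMMAS AND PROOFS =====

-- proof-side view of B's inner loop: length of the run of head at the front of a list
def runLenB (head : Int) : List Int → Nat
  | [] => 0
  | x :: r => if x = head then 1 + runLenB head r else 0

-- proof-side view of B's outer loop, phrased on the remaining suffix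
def goB : List Int → Bool
  | [] => true
  | head :: r =>
    let k := runLenB head (head :: r)
    if k ≥ 4 then false else goB ((head :: r).drop k)
  termination_by l => l.length
  decreasing_by
    simp only [List.length_drop, List.length_cons]
    have : runLenB head (head :: r) = 1 + runLenB head r := by simp [runLenB]
    omega

theorem innerB_eq_runLenB (trials : List Int) (i : Nat) (hi : i < trials.length) :
    ∀ (d j : Nat), trials.length - j ≤ d →
      innerB trials i j = j + runLenB trials[i] (trials.drop j) := by
  intro d
  induction d with
  | zero =>
    intro j hd
    have hj : trials.length ≤ j := by omega
    have hdrop : trials.drop j = [] := List.drop_eq_nil_of_le hj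
    rw [innerB, hdrop]
    have : ¬ (j < trials.length ∧ trials[j]? = trials[i]?) := by
      intro h; omega
    rw [if_neg this]
    simp [runLenB]
  | succ d ih =>
    intro j hd
    by_cases hj : j < trials.length
    · have hdrop : trials.drop j = trials[j] :: trials.drop (j + 1) :=
        List.drop_eq_getElem_cons hj
      rw [innerB, hdrop]
      by_cases he : trials[j] = trials[i]
      · have hcond : j < trials.length ∧ trials[j]? = trials[i]? := by
          refine ⟨hj, ?_⟩
          rw [List.getElem?_eq_getElem hj, List.getElem?_eq_getElem hi, he]
        rw [if_pos hcond, ih (j + 1) (by omega)]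
        simp [runLenB, he]
        omega
      · have hcond : ¬ (j < trials.length ∧ trials[j]? = trials[i]?) := by
          rintro ⟨-, hq⟩
          rw [List.getElem?_eq_getElem hj, List.getElem?_eq_getElem hi] at hq
          exact he (Option.some.injEq _ _ ▸ hq)
        rw [if_neg hcond]
        simp [runLenB, he]
    · have hdrop : trials.drop j = [] := List.drop_eq_nil_of_le (by omega)
      rw [innerB, hdrop]
      have : ¬ (j < trials.length ∧ trials[j]? = trials[i]?) := by intro h; omega
      rw [if_neg this]
      simp [runLenB]

theorem outerB_eq_goB (trials : List Int) : ∀ (d i : Nat),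
    trials.length - i ≤ d → outerB trials i = goB (trials.drop i) := by
  intro d
  induction d with
  | zero =>
    intro i hd
    have hdrop : trials.drop i = [] := List.drop_eq_nil_of_le (by omega)
    rw [outerB, hdrop]
    have : ¬ i < trials.length := by omega
    rw [dif_neg this]
    simp [goB]
  | succ d ih =>
    intro i hd
    by_cases hi : i < trials.length
    · have hdrop : trials.drop i = trials[i] :: trials.drop (i + 1) :=
        List.drop_eq_getElem_cons hi
      have hinner : innerB trials i i = i + runLenB trials[i] (trials.drop i) :=
        innerB_eq_runLenB trials i hi (d + 1) i hd
      have hk1 : 1 ≤ runLenB trials[i] (trials.drop i) := by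
        rw [hdrop]; simp [runLenB]
      rw [outerB, dif_pos hi]
      simp only [hinner]
      have hsub : i + runLenB trials[i] (trials.drop i) - i
          = runLenB trials[i] (trials.drop i) := by omega
      rw [hsub]
      conv_rhs => rw [hdrop, goB]
      have hkk : runLenB trials[i] (trials[i] :: trials.drop (i + 1))
          = runLenB trials[i] (trials.drop i) := by rw [hdrop]
      simp only [hkk]
      by_cases h4 : runLenB trials[i] (trials.drop i) ≥ 4
      · rw [if_pos h4, if_pos h4]
      · rw [if_neg h4, if_neg h4]
        have hdd : (trials[i] :: trials.drop (i + 1)).drop (runLenB trials[i] (trials.drop i))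
            = trials.drop (i + runLenB trials[i] (trials.drop i)) := by
          rw [← hdrop, List.drop_drop, Nat.add_comm]
        rw [hdd]
        exact ih (i + runLenB trials[i] (trials.drop i)) (by omega)
    · have hdrop : trials.drop i = [] := List.drop_eq_nil_of_le (by omega)
      rw [outerB, hdrop, dif_neg hi]
      simp [goB]

theorem altB_eq_goB (trials : List Int) : check_if_trials_order_ok_alt trials = goB trials := by
  unfold check_if_trials_order_ok_alt
  rw [outerB_eq_goB trials trials.length 0 (by omega)]
  simp

-- A's loop with the previous element carried along instead of re-indexed
def simpA : Int → Int → List Int → Bool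
  | _, _, [] => true
  | prev, same, t :: rest =>
    if t = prev then
      if same + 1 ≥ 4 then false else simpA t (same + 1) rest
    else simpA t 1 rest

theorem goA_eq_simpA (rest : List Int) : ∀ (pre : List Int) (prev same : Int),
    goA (pre ++ prev :: rest) rest same ((pre.length : Int) + 1) = simpA prev same rest := by
  induction rest with
  | nil => intro pre prev same; simp [goA, simpA]
  | cons t r ih =>
    intro pre prev same
    have hi : ((pre.length : Int) + 1) ≠ 0 := by omega
    have hget : PySem.List.pyGet? (pre ++ prev :: t :: r) ((pre.length : Int) + 1 - 1)
        = some prev := by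
      have : (pre.length : Int) + 1 - 1 = (pre.length : Int) := by ring
      rw [this]
      exact PySem.List.pyGet?_append_length pre (t :: r) prev
    have hstep : ∀ (s : Int),
        goA (pre ++ prev :: t :: r) r s ((pre.length : Int) + 1 + 1)
          = simpA t s r := by
      intro s
      have hre : pre ++ prev :: t :: r = (pre ++ [prev]) ++ t :: r := by simp
      have hlen : ((pre.length : Int) + 1 + 1) = (((pre ++ [prev]).length : Int) + 1) := by
        simp
      rw [hre, hlen]
      exact ih (pre ++ [prev]) t s
    by_cases ht : t = prev
    · subst ht
      simp only [goA, simpA, hi, hget]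
      by_cases h4 : same + 1 ≥ 4
      · simp [h4]
      · simp [h4, hstep]
    · have hne : PySem.List.pyGet? (pre ++ prev :: t :: r) ((pre.length : Int) + 1 - 1)
          ≠ some t := by
        rw [hget]; simp; intro h; exact ht h.symm
      simp only [goA, if_neg hi, if_neg hne, simpA, if_neg ht]
      exact hstep 1

theorem simpA_eq_goB (rest : List Int) : ∀ (prev same : Int), 1 ≤ same → same ≤ 3 →
    simpA prev same rest =
      (if 4 ≤ same + (runLenB prev rest : Int) then false
       else goB (rest.drop (runLenB prev rest))) := by
  induction rest with
  | nil => intro prev same h1 h3; simp [simpA, runLenB, goB]; omega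
  | cons t r ih =>
    intro prev same h1 h3
    by_cases ht : t = prev
    · subst ht
      have hrun : runLenB t (t :: r) = 1 + runLenB t r := by simp [runLenB]
      have hd : List.drop (1 + runLenB t r) (t :: r) = List.drop (runLenB t r) r := by
        rw [Nat.add_comm]; rfl
      by_cases h4 : same + 1 ≥ 4
      · have hbig : 4 ≤ same + (runLenB t (t :: r) : Int) := by rw [hrun]; push_cast; omega
        simp [simpA, h4, hbig]
      · have heq : simpA t (same + 1) r =
            (if 4 ≤ same + 1 + (runLenB t r : Int) then false
             else goB (r.drop (runLenB t r))) := ih t (same + 1) (by omega) (by omega)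
        simp only [simpA, if_neg h4, heq, hrun]
        by_cases hc : 4 ≤ same + 1 + (runLenB t r : Int)
        · simp [hc]
          intro h; omega
        · simp [hc, hd]
          intro _; omega
    · have hrun : runLenB prev (t :: r) = 0 := by simp [runLenB, ht]
      have hB : goB (t :: r) =
          (if 4 ≤ (1 : Int) + (runLenB t r : Int) then false
           else goB (r.drop (runLenB t r))) := by
        rw [goB]
        have h1' : runLenB t (t :: r) = 1 + runLenB t r := by simp [runLenB]
        have hd : List.drop (runLenB t (t :: r)) (t :: r) = List.drop (runLenB t r) r := by
          rw [h1', Nat.add_comm]; rfl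
        by_cases h4 : 4 ≤ (1 : Int) + (runLenB t r : Int)
        · have hge : runLenB t (t :: r) ≥ 4 := by omega
          simp [hge, h4]
        · have hlt : ¬ runLenB t (t :: r) ≥ 4 := by omega
          simp [hlt, h4, hd]
      have hI := ih t 1 (by omega) (by omega)
      simp only [simpA, if_neg ht, hrun, Nat.cast_zero]
      have hc0 : ¬ (4 ≤ same + (0 : Int)) := by omega
      rw [if_neg hc0, List.drop_zero, hB, hI]

-- ===== VERDICT (by name: the statement is the Claim_ definition above) =====
theorem check_if_trials_order_ok_spec : Claim_equal_check_if_trials_order_ok := by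
  intro trials _
  unfold Spec_check_if_trials_order_ok check_if_trials_order_ok
  rw [altB_eq_goB]
  cases trials with
  | nil => simp [goA, goB]
  | cons h t =>
    have h0 : goA (h :: t) (h :: t) 1 0 = goA (h :: t) t 1 1 := by simp [goA]
    have h1 : goA (([] : List Int) ++ h :: t) t 1 ((([] : List Int).length : Int) + 1)
        = simpA h 1 t := goA_eq_simpA t [] h 1
    simp only [List.nil_append, List.length_nil, Int.natCast_zero, zero_add] at h1
    rw [h0, h1, simpA_eq_goB t h 1 (by omega) (by omega)]
    rw [goB]
    have hr : runLenB h (h :: t) = 1 + runLenB h t := by simp [runLenB]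
    have hd : List.drop (runLenB h (h :: t)) (h :: t) = List.drop (runLenB h t) t := by
      rw [hr, Nat.add_comm]; rfl
    by_cases h4 : 4 ≤ (1 : Int) + (runLenB h t : Int)
    · have hge : runLenB h (h :: t) ≥ 4 := by omega
      simp [hge, h4]
    · have hlt : ¬ runLenB h (h :: t) ≥ 4 := by omega
      simp [hlt, h4, hd]
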